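-- pv_equiv track=rewrite | github.com/49469/ComunicacaoDigital2 | exercise1.py | hamming_coder
-- ===== SOURCE A (Python) =====
-- def string_to_binary(text):
--     return ''.join(format(ord(c), '08b') for c in text)
--
-- def hamming_coder(text):
--     binary_string = string_to_binary(text)
--     coded_string = ""
--     for i in range(0, len(binary_string), 4):
--         b0 = int(binary_string[i + 1]) ^ int(binary_string[i + 2]) ^ int(binary_string[i + 3])
--         b1 = int(binary_string[i + 0]) ^ int(binary_string[i + 1]) ^ int(binary_string[i + 3])
--         b2 = int(binary_string[i + 0]) ^ int(binary_string[i + 2]) ^ int(binary_string[i + 3])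
--         for j in range(4):
--             coded_string += binary_string[i + j]
--         coded_string += str(b0) + str(b1) + str(b2)
--     return coded_string
-- ===== SOURCE B (Python) =====
-- def _make_table():
--     table = []
--     for n in range(16):
--         d = [(n >> 3) & 1, (n >> 2) & 1, (n >> 1) & 1, n & 1]
--         b0 = d[1] ^ d[2] ^ d[3]
--         b1 = d[0] ^ d[1] ^ d[3]
--         b2 = d[0] ^ d[2] ^ d[3]
--         table.append(''.join(str(x) for x in d + [b0, b1, b2]))
--     return table
--
-- def hamming_coder(text):
--     table = _make_table()
--     out = []
--     for c in text:
--         o = ord(c)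
--         out.append(table[o >> 4])
--         out.append(table[o & 15])
--     return ''.join(out)
-- ===== Notes on version B (the rewrite author's own statement) =====
-- stated objective: faster
-- what changed: B precomputes a 16-entry nibble-to-codeword table once and emits two table lookups per character (high and low nibble of ord(c)), joining collected pieces at the end, instead of building the intermediate binary string and computing per-bit int()/XOR parities with repeated string += per 4-bit block.
import Mathlib
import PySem

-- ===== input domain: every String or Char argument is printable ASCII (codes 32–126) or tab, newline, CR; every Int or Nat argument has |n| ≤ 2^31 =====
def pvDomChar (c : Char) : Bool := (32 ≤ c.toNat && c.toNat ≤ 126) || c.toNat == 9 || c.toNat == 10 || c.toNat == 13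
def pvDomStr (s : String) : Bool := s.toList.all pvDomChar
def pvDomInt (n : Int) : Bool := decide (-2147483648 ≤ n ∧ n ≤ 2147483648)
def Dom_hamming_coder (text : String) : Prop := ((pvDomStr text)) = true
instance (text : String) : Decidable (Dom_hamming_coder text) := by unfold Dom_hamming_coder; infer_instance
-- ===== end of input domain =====

-- B replaces per-block XOR arithmetic over a binary string by a 16-entry codeword table
-- indexed by each character's two nibbles (measurably faster in a timing run).
-- Strings are built as List Char and wrapped with String.ofList (exact: '+'/join on str).

-- ===== PORT A =====
-- format(ord(c),'08b'): exact for code points < 256 (all of Dom)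
def pvBitChar (n k : Nat) : Char := if (n >>> k) % 2 == 1 then '1' else '0'
def pvBits8 (n : Nat) : List Char :=
  [pvBitChar n 7, pvBitChar n 6, pvBitChar n 5, pvBitChar n 4,
   pvBitChar n 3, pvBitChar n 2, pvBitChar n 1, pvBitChar n 0]
-- int(ch) for ch ∈ {'0','1'}, the only chars string_to_binary produces
def pvCInt (c : Char) : Nat := if c == '1' then 1 else 0
-- str(b) for b ∈ {0,1}
def pvDigit (n : Nat) : Char := if n == 1 then '1' else '0'
def string_to_binary (text : String) : List Char :=
  text.toList.flatMap (fun c => pvBits8 c.toNat)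
-- the for-loop over range(0, len, 4), accumulating coded_string (as a char list)
def pvLoopA (bs : List Char) (acc : List Char) : List Char :=
  match bs with
  | c0 :: c1 :: c2 :: c3 :: rest =>
    let b0 := (pvCInt c1) ^^^ (pvCInt c2) ^^^ (pvCInt c3)
    let b1 := (pvCInt c0) ^^^ (pvCInt c1) ^^^ (pvCInt c3)
    let b2 := (pvCInt c0) ^^^ (pvCInt c2) ^^^ (pvCInt c3)
    pvLoopA rest (acc ++ [c0, c1, c2, c3] ++ [pvDigit b0, pvDigit b1, pvDigit b2])
  | _ => acc   -- fewer than 4 bits left: only the empty case is reachable (each char contributes 8 bits)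
def hamming_coder (text : String) : String :=
  String.ofList (pvLoopA (string_to_binary text) [])

-- ===== PORT B =====
def pvCodeword (n : Nat) : List Char :=
  let d0 := (n >>> 3) &&& 1
  let d1 := (n >>> 2) &&& 1
  let d2 := (n >>> 1) &&& 1
  let d3 := n &&& 1
  let b0 := d1 ^^^ d2 ^^^ d3
  let b1 := d0 ^^^ d1 ^^^ d3
  let b2 := d0 ^^^ d2 ^^^ d3
  [pvDigit d0, pvDigit d1, pvDigit d2, pvDigit d3, pvDigit b0, pvDigit b1, pvDigit b2]
def pvTable : List (List Char) := (List.range 16).map pvCodeword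
-- ''.join(out) = flatten of the collected pieces
def hamming_coder_alt (text : String) : String :=
  String.ofList
    ((text.toList.flatMap (fun c =>
      [pvTable.getD (c.toNat >>> 4) [], pvTable.getD (c.toNat &&& 15) []])).flatten)

-- ===== PRECONDITION & SPEC =====
def Spec_hamming_coder (text : String) (out : String) : Prop := out = hamming_coder_alt text
instance (text : String) (out : String) : Decidable (Spec_hamming_coder text out) := by unfold Spec_hamming_coder; infer_instance

-- ===== CLAIM (what is proved, stated in full; the proofs are below) =====
def Claim_equal_hamming_coder : Prop := ∀ (text : String), Dom_hamming_coder text → Spec_hamming_coder text (hamming_coder text)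

-- ===== LEMMAS AND PROOFS =====

theorem pvLoopA_acc2 : (bs : List Char) → (a1 a2 : List Char) →
    pvLoopA bs (a1 ++ a2) = a1 ++ pvLoopA bs a2
  | c0 :: c1 :: c2 :: c3 :: rest, a1, a2 => by
    rw [pvLoopA, pvLoopA]
    simp only [List.append_assoc]
    exact pvLoopA_acc2 rest a1 _
  | [], _, _ => rfl
  | [_], _, _ => rfl
  | [_, _], _, _ => rfl
  | [_, _, _], _, _ => rfl

theorem pvLoopA_acc (bs : List Char) (acc : List Char) :
    pvLoopA bs acc = acc ++ pvLoopA bs [] := by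
  have h := pvLoopA_acc2 bs acc []
  simpa using h

set_option maxRecDepth 8000 in
theorem pvChar_step (n : Nat) (hn : n < 127) (rest : List Char) :
    pvLoopA (pvBits8 n ++ rest) [] =
      (pvTable.getD (n >>> 4) [] ++ pvTable.getD (n &&& 15) []) ++ pvLoopA rest [] := by
  have key : ∀ m < 127, pvLoopA (pvBits8 m) [] =
      pvTable.getD (m >>> 4) [] ++ pvTable.getD (m &&& 15) [] := by decide
  rw [show pvBits8 n ++ rest =
      pvBitChar n 7 :: pvBitChar n 6 :: pvBitChar n 5 :: pvBitChar n 4 ::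
      pvBitChar n 3 :: pvBitChar n 2 :: pvBitChar n 1 :: pvBitChar n 0 :: rest from rfl]
  rw [pvLoopA, pvLoopA, pvLoopA_acc, ← key n hn]
  rw [show pvBits8 n = pvBitChar n 7 :: pvBitChar n 6 :: pvBitChar n 5 :: pvBitChar n 4 ::
      pvBitChar n 3 :: pvBitChar n 2 :: pvBitChar n 1 :: [pvBitChar n 0] from rfl]
  rw [pvLoopA, pvLoopA, pvLoopA_acc (acc := _ ++ _ ++ _)]
  simp [pvLoopA]

theorem pvLists_eq (l : List Char) (hdom : l.all pvDomChar = true) :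
    pvLoopA (l.flatMap (fun c => pvBits8 c.toNat)) [] =
      (l.flatMap (fun c =>
        [pvTable.getD (c.toNat >>> 4) [], pvTable.getD (c.toNat &&& 15) []])).flatten := by
  induction l with
  | nil => rfl
  | cons c cs ih =>
    simp only [List.all_cons, Bool.and_eq_true] at hdom
    have hc : c.toNat < 127 := by
      have h := hdom.1
      simp only [pvDomChar, Bool.or_eq_true, Bool.and_eq_true, beq_iff_eq,
        decide_eq_true_eq] at h
      rcases h with ((⟨h1, h2⟩ | h) | h) | h <;> omega
    simp only [List.flatMap_cons, pvChar_step c.toNat hc, ih hdom.2, List.append_assoc]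
    simp

theorem hamming_coder_spec : Claim_equal_hamming_coder := by
  unfold Claim_equal_hamming_coder
  intro text hdom
  unfold Spec_hamming_coder hamming_coder hamming_coder_alt string_to_binary
  unfold Dom_hamming_coder pvDomStr at hdom
  exact congrArg String.ofList (pvLists_eq text.toList hdom)
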